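-- pv_equiv track=rewrite | github.com/wowemulation-dev/cascette-py | cascette_tools/formats/root.py | format_locale_flags
-- ===== SOURCE A (Python) =====
-- def format_locale_flags(flags: int) -> str:
--     """Format locale flags as human-readable string."""
--     locales = {
--         0x00000002: "enUS",
--         0x00000004: "koKR",
--         0x00000010: "frFR",
--         0x00000020: "deDE",
--         0x00000040: "zhCN",
--         0x00000080: "zhTW",
--         0x00000100: "esES",
--         0x00000200: "esMX",
--         0x00000400: "ruRU",
--         0x00000800: "ptBR",
--         0x00001000: "itIT",
--         0x00002000: "ptPT"
--     }
--
--     active_locales = []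
--     for flag, locale in locales.items():
--         if flags & flag:
--             active_locales.append(locale)
--
--     if not active_locales:
--         return f"None (0x{flags:08x})"
--
--     return f"{', '.join(active_locales)} (0x{flags:08x})"
-- ===== SOURCE B (Python) =====
-- # locale names keyed by bit position (bits 0 and 3 are unassigned)
-- _NAMES = {
--     1: "enUS", 2: "koKR", 4: "frFR", 5: "deDE", 6: "zhCN", 7: "zhTW",
--     8: "esES", 9: "esMX", 10: "ruRU", 11: "ptBR", 12: "itIT", 13: "ptPT",
-- }
-- _MASK = 0x3FF6  # union of all known locale bits
--
--
-- def format_locale_flags(flags: int) -> str: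
--     """Format locale flags as human-readable string."""
--     m = flags & _MASK  # nonnegative copy holding only the known bits
--     names = []
--     pos = 0
--     while m:
--         if m & 1:
--             name = _NAMES.get(pos)
--             if name is not None:
--                 names.append(name)
--         m >>= 1
--         pos += 1
--     if not names:
--         return f"None (0x{flags:08x})"
--     return f"{', '.join(names)} (0x{flags:08x})"
-- ===== Notes on version B (the rewrite author's own statement) =====
-- stated objective: alternative
-- what changed: B scans the set bits of the input (masked to the known locale bits) from lowest to highest and looks each bit position up in a position-keyed name table, instead of A's scan over a fixed table of flag masks testing each against the input.
import Mathlib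
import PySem

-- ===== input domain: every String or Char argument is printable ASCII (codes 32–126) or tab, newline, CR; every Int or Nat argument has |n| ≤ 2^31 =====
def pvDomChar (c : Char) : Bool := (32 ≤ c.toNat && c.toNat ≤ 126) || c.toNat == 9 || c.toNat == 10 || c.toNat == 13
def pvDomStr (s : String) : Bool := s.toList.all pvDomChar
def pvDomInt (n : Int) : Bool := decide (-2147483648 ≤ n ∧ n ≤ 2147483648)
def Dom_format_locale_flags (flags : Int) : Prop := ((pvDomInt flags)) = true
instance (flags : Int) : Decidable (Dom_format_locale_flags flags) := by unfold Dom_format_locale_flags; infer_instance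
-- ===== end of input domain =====

-- B formats the same locale bitfield by scanning the set bits of the (masked) input instead of
-- scanning A's fixed table of flag masks; objective: alternative traversal, same cost.

-- shared primitive: Python's format(n, '08x') (f-string "{flags:08x}"), exact for any int
def hexDigitChar (n : Nat) : Char := if n < 10 then Char.ofNat (48 + n) else Char.ofNat (87 + n)

def hexChars (n : Nat) : List Char :=
  if _h : n < 16 then [hexDigitChar n]
  else hexChars (n / 16) ++ [hexDigitChar (n % 16)]
termination_by n
decreasing_by exact Nat.div_lt_self (by omega) (by omega)

def pyHex08 (n : Int) : String :=
  PySem.Str.zfill (String.ofList ((if n < 0 then ['-'] else []) ++ hexChars n.natAbs)) 8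

-- ===== PORT A =====
def pvLocalesA : PySem.Dict Int String :=
  PySem.Dict.ofList [(0x2, "enUS"), (0x4, "koKR"), (0x10, "frFR"), (0x20, "deDE"),
    (0x40, "zhCN"), (0x80, "zhTW"), (0x100, "esES"), (0x200, "esMX"),
    (0x400, "ruRU"), (0x800, "ptBR"), (0x1000, "itIT"), (0x2000, "ptPT")]

def format_locale_flags (flags : Int) : String :=
  let active :=
    (PySem.Dict.items pvLocalesA).foldl
      (fun acc fl => if PySem.Int.band flags fl.1 ≠ 0 then acc ++ [fl.2] else acc) []
  if active = [] then "None (0x" ++ pyHex08 flags ++ ")"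
  else PySem.Str.join ", " active ++ " (0x" ++ pyHex08 flags ++ ")"

-- ===== PORT B =====
-- Source B's table: locale names keyed by BIT POSITION (bits 0 and 3 are unassigned)
def pvNamesB : PySem.Dict Int String :=
  PySem.Dict.ofList [(1, "enUS"), (2, "koKR"), (4, "frFR"), (5, "deDE"), (6, "zhCN"),
    (7, "zhTW"), (8, "esES"), (9, "esMX"), (10, "ruRU"), (11, "ptBR"), (12, "itIT"),
    (13, "ptPT")]

-- Source B's while loop over the masked copy m (m is nonnegative, so it is carried as a Nat)
def altLoop (m pos : Nat) (acc : List String) : List String :=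
  if h : m = 0 then acc
  else
    altLoop (m / 2) (pos + 1)
      (acc ++ (if m % 2 = 1 then
        (match PySem.Dict.get? pvNamesB (pos : Int) with
         | some name => [name]
         | none => []) else []))
termination_by m
decreasing_by exact Nat.div_lt_self (Nat.pos_of_ne_zero h) (by omega)

def format_locale_flags_alt (flags : Int) : String :=
  let m := (PySem.Int.band flags 0x3FF6).toNat
  let names := altLoop m 0 []
  if names = [] then "None (0x" ++ pyHex08 flags ++ ")"
  else PySem.Str.join ", " names ++ " (0x" ++ pyHex08 flags ++ ")"

-- ===== PRECONDITION & SPEC =====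
def Spec_format_locale_flags (flags : Int) (out : String) : Prop := out = format_locale_flags_alt flags
instance (flags : Int) (out : String) : Decidable (Spec_format_locale_flags flags out) := by unfold Spec_format_locale_flags; infer_instance

-- ===== CLAIM (what is proved, stated in full; the proofs are below) =====
def Claim_equal_format_locale_flags : Prop := ∀ (flags : Int), Dom_format_locale_flags flags → Spec_format_locale_flags flags (format_locale_flags flags)

-- ===== LEMMAS AND PROOFS =====

-- spec-side view of Source B's loop: fuel-indexed bit scan
def pvChunk (pos : Nat) : List String :=
  match PySem.Dict.get? pvNamesB (pos : Int) with
  | some name => [name]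
  | none => []

def pvBits : Nat → Nat → Nat → List String
  | 0, _, _ => []
  | k+1, m, pos => (if m % 2 = 1 then pvChunk pos else []) ++ pvBits k (m / 2) (pos + 1)

theorem pvBits_zero (k : Nat) : ∀ pos, pvBits k 0 pos = [] := by
  induction k with
  | zero => intro pos; rfl
  | succ k ih => intro pos; simp [pvBits, ih]

theorem altLoop_eq_pvBits (k : Nat) : ∀ m pos acc, m < 2 ^ k →
    altLoop m pos acc = acc ++ pvBits k m pos := by
  induction k with
  | zero =>
    intro m pos acc h
    have hm : m = 0 := by omega
    subst hm
    rw [altLoop]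
    simp [pvBits]
  | succ k ih =>
    intro m pos acc h
    by_cases hm : m = 0
    · subst hm; rw [altLoop]; simp [pvBits, pvBits_zero]
    · rw [altLoop]
      simp only [dif_neg hm]
      rw [ih (m / 2) (pos + 1) _ (by
        have : m < 2 ^ k * 2 := by rw [← pow_succ]; exact h
        omega)]
      simp [pvBits, pvChunk, List.append_assoc]

theorem testBit_div_mod (i : Nat) : ∀ x : Nat, Nat.testBit x i = decide (x / 2 ^ i % 2 = 1) := by
  induction i with
  | zero => intro x; simp [Nat.testBit_zero]
  | succ i ih =>
    intro x
    rw [Nat.testBit_succ, ih (x / 2), Nat.div_div_eq_div_mul, pow_succ]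
    ring_nf

theorem and_div_two (x y : Nat) : (x &&& y) / 2 = x / 2 &&& y / 2 := by
  apply Nat.eq_of_testBit_eq
  intro i
  simp only [Nat.testBit_div_two, Nat.testBit_and]

theorem and_mod_two (x y : Nat) : (x &&& y) % 2 = 1 ↔ (x % 2 = 1 ∧ y % 2 = 1) := by
  have h := Nat.testBit_and x y 0
  simp only [Nat.testBit_zero] at h
  constructor
  · intro hk
    have := h
    rw [decide_eq_true hk] at this
    constructor
    · by_contra hx
      rw [decide_eq_false hx] at this; simp at this
    · by_contra hy
      rw [decide_eq_false hy] at this; simp at this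
  · rintro ⟨hx, hy⟩
    rw [decide_eq_true hx, decide_eq_true hy] at h
    simpa using h.symm

-- the bit identity justifying the mask on a negative argument: x - (x & y) clears y's bits from x
theorem sub_and_testBit (i : Nat) : ∀ x y : Nat,
    (x - (x &&& y)).testBit i = (x.testBit i && !(y.testBit i)) := by
  induction i with
  | zero =>
    intro x y
    have hle : x &&& y ≤ x := Nat.and_le_left
    have hm := and_mod_two x y
    simp only [Nat.testBit_zero]
    have hgoal : (x - (x &&& y)) % 2 = 1 ↔ (x % 2 = 1 ∧ ¬ y % 2 = 1) := by omega
    simp [hgoal]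
    rcases Nat.mod_two_eq_zero_or_one y with hy | hy <;> simp [hy]
  | succ i ih =>
    intro x y
    have hle : x &&& y ≤ x := Nat.and_le_left
    have hdiv : (x &&& y) / 2 = x / 2 &&& y / 2 := and_div_two x y
    have hmod : (x &&& y) % 2 = 1 → x % 2 = 1 := fun h => ((and_mod_two x y).1 h).1
    have hstep : (x - (x &&& y)) / 2 = x / 2 - (x / 2 &&& y / 2) := by
      have h2 : x &&& y = 2 * (x / 2 &&& y / 2) + (x &&& y) % 2 := by omega
      omega
    rw [Nat.testBit_succ, hstep, ih (x / 2) (y / 2), Nat.testBit_div_two, Nat.testBit_div_two]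

theorem band_neg_eq (flags : Int) (n : Nat) (hneg : flags < 0) :
    PySem.Int.band flags (n : Int) = ((n - (n &&& (-flags - 1).toNat) : Nat) : Int) := by
  simp [PySem.Int.band, not_le.mpr hneg, Int.toNat_natCast]

theorem bridge (flags : Int) (i : Nat) (hbit : Nat.testBit 16374 i = true) :
    (PySem.Int.band flags ((2 : Int) ^ i) ≠ 0) ↔
      Nat.testBit (PySem.Int.band flags 16374).toNat i = true := by
  have h2 : ((2 : Int) ^ i) = ((2 ^ i : Nat) : Int) := by push_cast; ring
  have h16374 : ((16374 : Int)) = ((16374 : Nat) : Int) := by norm_num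
  rcases (by omega : 0 ≤ flags ∨ flags < 0) with hpos | hneg
  · obtain ⟨a, rfl⟩ : ∃ a : Nat, flags = (a : Int) := ⟨flags.toNat, (Int.toNat_of_nonneg hpos).symm⟩
    rw [h2, h16374, PySem.Int.band_natCast, PySem.Int.band_natCast, Int.toNat_natCast,
      Nat.testBit_and, hbit, Bool.and_true, Nat.and_two_pow]
    cases h : a.testBit i <;> simp_all
  · rw [h2, h16374, band_neg_eq flags (2 ^ i) hneg, band_neg_eq flags 16374 hneg,
      Int.toNat_natCast]
    set b := (-flags - 1).toNat with hb
    rw [sub_and_testBit, hbit, Bool.true_and, Nat.and_comm (2 ^ i) b, Nat.and_two_pow]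
    cases h : b.testBit i <;> simp_all

-- chunk values of Source B's dict lookups at each scanned bit
theorem chunk0 : pvChunk 0 = [] := by rfl
theorem chunk1 : pvChunk 1 = ["enUS"] := by rfl
theorem chunk2 : pvChunk 2 = ["koKR"] := by rfl
theorem chunk3 : pvChunk 3 = [] := by rfl
theorem chunk4 : pvChunk 4 = ["frFR"] := by rfl
theorem chunk5 : pvChunk 5 = ["deDE"] := by rfl
theorem chunk6 : pvChunk 6 = ["zhCN"] := by rfl
theorem chunk7 : pvChunk 7 = ["zhTW"] := by rfl
theorem chunk8 : pvChunk 8 = ["esES"] := by rfl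
theorem chunk9 : pvChunk 9 = ["esMX"] := by rfl
theorem chunk10 : pvChunk 10 = ["ruRU"] := by rfl
theorem chunk11 : pvChunk 11 = ["ptBR"] := by rfl
theorem chunk12 : pvChunk 12 = ["itIT"] := by rfl
theorem chunk13 : pvChunk 13 = ["ptPT"] := by rfl

theorem fm_cons {α β : Type} (p : α → Bool) (f : α → β) (x : α) (l : List α) :
    ((x :: l).filter p).map f = (if p x = true then [f x] else []) ++ (l.filter p).map f := by
  by_cases h : p x <;> simp [h]

theorem cor (flags : Int) (i : Nat) (hbit : Nat.testBit 16374 i = true) :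
    (PySem.Int.band flags ((2 : Int) ^ i) ≠ 0) ↔
      (PySem.Int.band flags 16374).toNat / 2 ^ i % 2 = 1 := by
  rw [bridge flags i hbit, testBit_div_mod, decide_eq_true_eq]

theorem names_eq (flags : Int) :
    (PySem.Dict.items pvLocalesA).foldl
      (fun acc fl => if PySem.Int.band flags fl.1 ≠ 0 then acc ++ [fl.2] else acc) [] =
    altLoop (PySem.Int.band flags 0x3FF6).toNat 0 [] := by
  have hle : (PySem.Int.band flags 16374).toNat ≤ 16374 := by
    rcases (by omega : 0 ≤ flags ∨ flags < 0) with hpos | hneg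
    · obtain ⟨a, rfl⟩ : ∃ a : Nat, flags = (a : Int) := ⟨flags.toNat, (Int.toNat_of_nonneg hpos).symm⟩
      rw [show ((16374 : Int)) = ((16374 : Nat) : Int) by norm_num, PySem.Int.band_natCast,
        Int.toNat_natCast]
      exact Nat.and_le_right
    · rw [show ((16374 : Int)) = ((16374 : Nat) : Int) by norm_num,
        band_neg_eq flags 16374 hneg, Int.toNat_natCast]
      omega
  have hlt : (PySem.Int.band flags 16374).toNat < 2 ^ 14 := by omega
  rw [show ((0x3FF6 : Int)) = (16374 : Int) by norm_num,
    altLoop_eq_pvBits 14 _ 0 [] hlt, List.nil_append]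
  have hfun : (fun (acc : List String) (fl : Int × String) =>
        if PySem.Int.band flags fl.1 ≠ 0 then acc ++ [fl.2] else acc) =
      (fun acc fl =>
        if (fun fl : Int × String => decide (PySem.Int.band flags fl.1 ≠ 0)) fl = true
        then acc ++ [(fun fl : Int × String => fl.2) fl] else acc) := by
    funext acc fl; simp
  rw [hfun, PySem.List.foldl_append_if, List.nil_append]
  have hitems : PySem.Dict.items pvLocalesA =
      [((2 : Int), "enUS"), (4, "koKR"), (16, "frFR"), (32, "deDE"), (64, "zhCN"),
       (128, "zhTW"), (256, "esES"), (512, "esMX"), (1024, "ruRU"), (2048, "ptBR"),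
       (4096, "itIT"), (8192, "ptPT")] := by rfl
  rw [hitems]
  have c1 := cor flags 1 (by decide)
  have c2 := cor flags 2 (by decide)
  have c4 := cor flags 4 (by decide)
  have c5 := cor flags 5 (by decide)
  have c6 := cor flags 6 (by decide)
  have c7 := cor flags 7 (by decide)
  have c8 := cor flags 8 (by decide)
  have c9 := cor flags 9 (by decide)
  have c10 := cor flags 10 (by decide)
  have c11 := cor flags 11 (by decide)
  have c12 := cor flags 12 (by decide)
  have c13 := cor flags 13 (by decide)
  norm_num at c1 c2 c4 c5 c6 c7 c8 c9 c10 c11 c12 c13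
  simp only [fm_cons, List.filter_nil, List.map_nil, List.append_nil, decide_eq_true_eq,
    pvBits, chunk0, Nat.div_div_eq_div_mul]
  norm_num [c1, c2, c4, c5, c6, c7, c8, c9, c10, c11, c12, c13, chunk1, chunk2, chunk3,
    chunk4, chunk5, chunk6, chunk7, chunk8, chunk9, chunk10, chunk11, chunk12, chunk13]

-- ===== VERDICT (by name: the statement is the Claim_ definition above) =====
theorem format_locale_flags_spec : Claim_equal_format_locale_flags := by
  intro flags _
  unfold Spec_format_locale_flags format_locale_flags format_locale_flags_alt
  rw [names_eq flags]
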